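-- pv_equiv track=rewrite | github.com/leesoeun98/python_codingtest_programmers | 22.02/22.02.10/pro_1_exam.py | solution
-- ===== SOURCE A (Python) =====
-- def solution(answers):
--     first=[1,2,3,4,5]
--     second=[2,1,2,3,2,4,2,5]
--     third=[3,3,1,1,2,2,4,4,5,5]
--     dic = {1: 0, 2: 0, 3: 0}
--     for idx, answer in enumerate(answers):
--         if first[idx%len(first)]==answer:
--             dic[1]+=1
--         if second[idx%len(second)]==answer:
--             dic[2]+=1
--         if third[idx%len(third)]==answer:
--             dic[3]+=1
--     return [k for k,v in dic.items() if max(dic.values())==v]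
-- ===== SOURCE B (Python) =====
-- def solution(answers):
--     # All three patterns have periods 5, 8, 10, which divide 40: bucket the
--     # answers by index mod 40 once, then score each bot from the 40 buckets.
--     cnt = {}
--     for i, a in enumerate(answers):
--         k = (i % 40, a)
--         cnt[k] = cnt.get(k, 0) + 1
--     scores = []
--     for p in ([1, 2, 3, 4, 5],
--               [2, 1, 2, 3, 2, 4, 2, 5],
--               [3, 3, 1, 1, 2, 2, 4, 4, 5, 5]):
--         s = 0
--         for r in range(40):
--             s += cnt.get((r, p[r % len(p)]), 0)
--         scores.append(s)
--     m = max(scores)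
--     return [i + 1 for i, s in enumerate(scores) if s == m]
-- ===== Notes on version B (the rewrite author's own statement) =====
-- stated objective: alternative
-- what changed: B never compares answers against patterns element by element: it buckets the answers into a histogram keyed by (index mod 40, answer) in one pass (40 is the lcm of the three pattern periods 5, 8, 10), then computes each bot's score as a fixed 40-term sum over the residue buckets, and selects the maxima from a plain score list instead of A's dict filter.
import Mathlib
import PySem

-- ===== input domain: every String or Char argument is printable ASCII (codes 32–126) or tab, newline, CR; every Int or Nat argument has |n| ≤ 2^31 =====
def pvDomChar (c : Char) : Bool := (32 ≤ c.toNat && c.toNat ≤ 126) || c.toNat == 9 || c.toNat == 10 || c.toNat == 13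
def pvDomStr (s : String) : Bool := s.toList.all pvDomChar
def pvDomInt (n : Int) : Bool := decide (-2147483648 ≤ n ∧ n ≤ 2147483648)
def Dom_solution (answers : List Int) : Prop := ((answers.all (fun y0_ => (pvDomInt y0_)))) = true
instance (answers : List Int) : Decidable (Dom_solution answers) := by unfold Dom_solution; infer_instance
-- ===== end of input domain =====

-- B replaces A's per-answer pattern comparisons with a one-pass histogram keyed by (index mod 40, answer)
-- (40 = lcm of the pattern periods 5, 8, 10) and scores each bot as a fixed 40-term sum over the buckets.

-- ===== PORT A =====
def solution (answers : List Int) : List Int :=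
  let first : List Int := [1, 2, 3, 4, 5]
  let second : List Int := [2, 1, 2, 3, 2, 4, 2, 5]
  let third : List Int := [3, 3, 1, 1, 2, 2, 4, 4, 5, 5]
  let dic : PySem.Dict Int Int := PySem.Dict.ofList [(1, 0), (2, 0), (3, 0)]
  let dic := (PySem.List.enumerate answers).foldl (fun d ia =>
    let d := if PySem.List.pyGetD first (PySem.Int.mod ia.1 (PySem.List.len first)) 0 == ia.2
             then d.modify 1 0 (· + 1) else d
    let d := if PySem.List.pyGetD second (PySem.Int.mod ia.1 (PySem.List.len second)) 0 == ia.2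
             then d.modify 2 0 (· + 1) else d
    if PySem.List.pyGetD third (PySem.Int.mod ia.1 (PySem.List.len third)) 0 == ia.2
    then d.modify 3 0 (· + 1) else d) dic
  (dic.items.filter (fun kv => PySem.List.max? dic.values (fun y => y) == some kv.2)).map (fun kv => kv.1)

-- ===== PORT B =====
def solution_alt (answers : List Int) : List Int :=
  let cnt : PySem.Dict (Int × Int) Int := (PySem.List.enumerate answers).foldl (fun d ia =>
    let k := (PySem.Int.mod ia.1 40, ia.2)
    d.insert k (d.getD k 0 + 1)) PySem.Dict.empty
  let scores : List Int := ([[1, 2, 3, 4, 5], [2, 1, 2, 3, 2, 4, 2, 5], [3, 3, 1, 1, 2, 2, 4, 4, 5, 5]] : List (List Int)).map (fun p =>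
    (PySem.List.pyRange 0 40 1).foldl (fun s r =>
      s + cnt.getD (r, PySem.List.pyGetD p (PySem.Int.mod r (PySem.List.len p)) 0) 0) 0)
  let m : Int := (PySem.List.max? scores (fun y => y)).getD 0
  (PySem.List.enumerate scores).filterMap (fun is => if is.2 == m then some (is.1 + 1) else none)

-- ===== PRECONDITION & SPEC =====
def Spec_solution (answers : List Int) (out : List Int) : Prop := out = solution_alt answers
instance (answers : List Int) (out : List Int) : Decidable (Spec_solution answers out) := by unfold Spec_solution; infer_instance

-- ===== CLAIM (what is proved, stated in full; the proofs are below) =====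
def Claim_equal_solution : Prop := ∀ (answers : List Int), Dom_solution answers → Spec_solution answers (solution answers)

-- ===== LEMMAS AND PROOFS =====

-- `dic[k] += 1` on the literal three-key dict, one lemma per key
theorem dmod1 (a b c : Int) :
    (PySem.Dict.mk [(1, a), (2, b), (3, c)] : PySem.Dict Int Int).modify 1 0 (· + 1)
      = PySem.Dict.mk [(1, a + 1), (2, b), (3, c)] := by
  simp [PySem.Dict.modify, PySem.Dict.insert, PySem.Dict.getD, PySem.Dict.get?, PySem.Dict.contains]

theorem dmod2 (a b c : Int) :
    (PySem.Dict.mk [(1, a), (2, b), (3, c)] : PySem.Dict Int Int).modify 2 0 (· + 1)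
      = PySem.Dict.mk [(1, a), (2, b + 1), (3, c)] := by
  simp [PySem.Dict.modify, PySem.Dict.insert, PySem.Dict.getD, PySem.Dict.get?, PySem.Dict.contains]

theorem dmod3 (a b c : Int) :
    (PySem.Dict.mk [(1, a), (2, b), (3, c)] : PySem.Dict Int Int).modify 3 0 (· + 1)
      = PySem.Dict.mk [(1, a), (2, b), (3, c + 1)] := by
  simp [PySem.Dict.modify, PySem.Dict.insert, PySem.Dict.getD, PySem.Dict.get?, PySem.Dict.contains]

-- A's interleaved loop maintains exactly the three per-pattern match counts
theorem loopA (p1 p2 p3 : (Int × Int) → Bool) (l : List (Int × Int)) (a b c : Int) :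
    l.foldl (fun d ia =>
      if p3 ia = true then
        (if p2 ia = true then (if p1 ia = true then d.modify 1 0 (· + 1) else d).modify 2 0 (· + 1)
         else if p1 ia = true then d.modify 1 0 (· + 1) else d).modify 3 0 (· + 1)
      else
        if p2 ia = true then (if p1 ia = true then d.modify 1 0 (· + 1) else d).modify 2 0 (· + 1)
        else if p1 ia = true then d.modify 1 0 (· + 1) else d)
      (PySem.Dict.mk [(1, a), (2, b), (3, c)] : PySem.Dict Int Int)
    = PySem.Dict.mk [(1, a + (l.countP p1 : Int)), (2, b + (l.countP p2 : Int)), (3, c + (l.countP p3 : Int))] := by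
  induction l generalizing a b c with
  | nil => simp
  | cons ia t ih =>
    rw [List.foldl_cons]
    by_cases h1 : p1 ia = true <;> by_cases h2 : p2 ia = true <;> by_cases h3 : p3 ia = true <;>
      simp only [h1, h2, h3, if_true, Bool.false_eq_true, if_false, List.countP_cons] <;>
      (repeat first | rw [dmod1] | rw [dmod2] | rw [dmod3]) <;>
      rw [ih] <;>
      simp [PySem.Dict.mk.injEq, Prod.mk.injEq] <;>
      omega

-- the per-residue indicator sum over a duplicate-free residue list, one element at a time
theorem indicator_sum (v : Int → Int) (rs : List Int) (hnd : rs.Nodup) (x : Int × Int) :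
    (rs.map (fun r => if x = (r, v r) then (1 : Int) else 0)).sum
      = if x.1 ∈ rs ∧ x.2 = v x.1 then 1 else 0 := by
  induction rs with
  | nil => simp
  | cons r t ih =>
    simp only [List.nodup_cons] at hnd
    simp only [List.map_cons, List.sum_cons, ih hnd.2, List.mem_cons]
    by_cases hx : x = (r, v r)
    · subst hx
      simp [hnd.1]
    · have : ¬ (x.1 = r ∧ x.2 = v x.1) := by
        rintro ⟨h1, h2⟩; exact hx (by cases x; simp_all)
      simp only [hx, if_false]
      by_cases hm : x.1 ∈ t ∧ x.2 = v x.1 <;> simp [hm]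
      tauto

-- summing the bucket counts over the residues counts exactly the matching elements
theorem key_split (v : Int → Int) (rs : List Int) (hnd : rs.Nodup) (l : List (Int × Int)) :
    (rs.map (fun r => (l.count (r, v r) : Int))).sum
      = ((l.countP (fun x => decide (x.1 ∈ rs) && (x.2 == v x.1))) : Int) := by
  induction l with
  | nil => simp
  | cons x t ih =>
    have hsum : (rs.map (fun r => ((x :: t).count (r, v r) : Int))).sum
        = (rs.map (fun r => (t.count (r, v r) : Int))).sum
          + (rs.map (fun r => if x = (r, v r) then (1 : Int) else 0)).sum := by
      rw [← PySem.List.sum_map_add_int]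
      · congr 1
        apply List.map_congr_left
        intro r _
        rw [List.count_cons]
        by_cases hx : x = (r, v r) <;> simp [hx]
    rw [hsum, ih, indicator_sum v rs hnd x, List.countP_cons]
    by_cases hm : x.1 ∈ rs ∧ x.2 = v x.1
    · simp [hm.1, hm.2]
    · have : (decide (x.1 ∈ rs) && (x.2 == v x.1)) = false := by
        simp only [Bool.and_eq_false_iff, decide_eq_false_iff_not, beq_eq_false_iff_ne]
        tauto
      simp [hm, this]

-- B's 40-bucket score equals the direct match count, for any pattern whose period divides 40
theorem scoreB (p : List Int) (hpos : 0 < PySem.List.len p) (hdvd : PySem.List.len p ∣ 40)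
    (answers : List Int) :
    (PySem.List.pyRange 0 40 1).foldl (fun s r =>
        s + ((PySem.List.enumerate answers).foldl (fun d ia =>
              d.insert (PySem.Int.mod ia.1 40, ia.2)
                (d.getD (PySem.Int.mod ia.1 40, ia.2) 0 + 1)) (PySem.Dict.empty : PySem.Dict (Int × Int) Int)).getD
            (r, PySem.List.pyGetD p (PySem.Int.mod r (PySem.List.len p)) 0) 0) 0
    = ((PySem.List.enumerate answers).countP
        (fun ia => PySem.List.pyGetD p (PySem.Int.mod ia.1 (PySem.List.len p)) 0 == ia.2) : Int) := by
  set v : Int → Int := fun r => PySem.List.pyGetD p (PySem.Int.mod r (PySem.List.len p)) 0 with hv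
  set kl : List (Int × Int) := (PySem.List.enumerate answers).map (fun ia => (PySem.Int.mod ia.1 40, ia.2)) with hkl
  have hfold : (PySem.List.enumerate answers).foldl (fun d ia =>
        d.insert (PySem.Int.mod ia.1 40, ia.2) (d.getD (PySem.Int.mod ia.1 40, ia.2) 0 + 1))
        (PySem.Dict.empty : PySem.Dict (Int × Int) Int)
      = kl.foldl (fun d k => d.insert k (d.getD k 0 + 1)) PySem.Dict.empty := by
    rw [hkl, List.foldl_map]
  have hcnt : ∀ c, ((PySem.List.enumerate answers).foldl (fun d ia =>
        d.insert (PySem.Int.mod ia.1 40, ia.2) (d.getD (PySem.Int.mod ia.1 40, ia.2) 0 + 1))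
        (PySem.Dict.empty : PySem.Dict (Int × Int) Int)).getD c 0
      = (kl.count c : Int) := by
    intro c
    rw [hfold, PySem.Dict.getD_foldl_insert_add_one]
    simp [PySem.Dict.getD, PySem.Dict.get?, PySem.Dict.empty]
  rw [PySem.List.foldl_add (g := fun r =>
    ((PySem.List.enumerate answers).foldl (fun d ia =>
        d.insert (PySem.Int.mod ia.1 40, ia.2) (d.getD (PySem.Int.mod ia.1 40, ia.2) 0 + 1))
      (PySem.Dict.empty : PySem.Dict (Int × Int) Int)).getD (r, v r) 0)]
  have hmap : (PySem.List.pyRange 0 40 1).map (fun r =>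
      ((PySem.List.enumerate answers).foldl (fun d ia =>
          d.insert (PySem.Int.mod ia.1 40, ia.2) (d.getD (PySem.Int.mod ia.1 40, ia.2) 0 + 1))
        (PySem.Dict.empty : PySem.Dict (Int × Int) Int)).getD (r, v r) 0)
      = (PySem.List.pyRange 0 40 1).map (fun r => (kl.count (r, v r) : Int)) := by
    apply List.map_congr_left
    intro r _
    exact hcnt (r, v r)
  rw [hmap, key_split v _ (by decide) kl, hkl, List.countP_map]
  rw [zero_add]
  congr 1
  apply List.countP_congr
  intro ia _
  have h40 : (0 : Int) < 40 := by norm_num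
  have hmem : PySem.Int.mod ia.1 40 ∈ PySem.List.pyRange 0 40 1 := by
    rw [PySem.List.mem_pyRange_one]
    exact ⟨PySem.Int.mod_nonneg ia.1 h40, PySem.Int.mod_lt ia.1 h40⟩
  have hmm : PySem.Int.mod (PySem.Int.mod ia.1 40) (PySem.List.len p) = PySem.Int.mod ia.1 (PySem.List.len p) := by
    simp only [PySem.Int.mod_eq_emod_of_pos hpos, PySem.Int.mod_eq_emod_of_pos h40]
    exact Int.emod_emod_of_dvd ia.1 (by exact_mod_cast hdvd)
  simp only [Function.comp, hmem, decide_true, Bool.true_and, hv, hmm]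
  constructor
  · intro h; rw [beq_iff_eq] at *; omega
  · intro h; rw [beq_iff_eq] at *; omega

-- A's dict-based maximum selection equals B's list-based one, for any three scores
theorem finalEq (s1 s2 s3 : Int) :
    (((PySem.Dict.mk [(1, s1), (2, s2), (3, s3)] : PySem.Dict Int Int).items.filter
        (fun kv => PySem.List.max? (PySem.Dict.mk [(1, s1), (2, s2), (3, s3)] : PySem.Dict Int Int).values (fun y => y) == some kv.2)).map (fun kv => kv.1))
    = (PySem.List.enumerate [s1, s2, s3]).filterMap
        (fun is => if is.2 == (PySem.List.max? [s1, s2, s3] (fun y => y)).getD 0 then some (is.1 + 1) else none) := by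
  rw [show (PySem.Dict.mk [(1, s1), (2, s2), (3, s3)] : PySem.Dict Int Int).values = [s1, s2, s3] from rfl]
  rw [PySem.List.max?_id_cons]
  simp only [List.foldl, Option.getD_some]
  simp only [PySem.List.enumerate_cons, PySem.List.enumerate_nil]
  simp only [List.filter_cons, List.filter_nil, List.filterMap_cons, List.filterMap_nil,
    beq_iff_eq, Option.some.injEq]
  split_ifs <;> (try norm_num) <;> omega

-- ===== VERDICT =====
theorem solution_spec : Claim_equal_solution := by
  intro answers _
  unfold Spec_solution solution solution_alt
  simp only [List.map]
  rw [show (PySem.Dict.ofList [(1, 0), (2, 0), (3, 0)] : PySem.Dict Int Int)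
        = PySem.Dict.mk [(1, 0), (2, 0), (3, 0)] from rfl]
  rw [loopA (fun ia => PySem.List.pyGetD [1, 2, 3, 4, 5] (PySem.Int.mod ia.1 (PySem.List.len [1, 2, 3, 4, 5])) 0 == ia.2)
            (fun ia => PySem.List.pyGetD [2, 1, 2, 3, 2, 4, 2, 5] (PySem.Int.mod ia.1 (PySem.List.len [2, 1, 2, 3, 2, 4, 2, 5])) 0 == ia.2)
            (fun ia => PySem.List.pyGetD [3, 3, 1, 1, 2, 2, 4, 4, 5, 5] (PySem.Int.mod ia.1 (PySem.List.len [3, 3, 1, 1, 2, 2, 4, 4, 5, 5])) 0 == ia.2)]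
  simp only [zero_add]
  simp only [scoreB [1, 2, 3, 4, 5] (by decide) (by decide) answers,
      scoreB [2, 1, 2, 3, 2, 4, 2, 5] (by decide) (by decide) answers,
      scoreB [3, 3, 1, 1, 2, 2, 4, 4, 5, 5] (by decide) (by decide) answers]
  exact finalEq _ _ _
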